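-- pv_equiv track=rewrite | github.com/samerroz/nlp_app_reviews | src/executive_copy.py | _detect_theme_clusters
-- ===== SOURCE A (Python) =====
-- _SUPPORT_KWS = {"support", "respond", "response", "took", "forever", "wait",
--                 "waiting", "slow", "hours", "days", "reply", "ticket", "contacted"}
--
-- _UI_KWS = {"clicked", "click", "finally", "figured", "intuitive", "confusing",
--            "confused", "navigation", "interface", "button", "screen", "menu",
--            "difficult", "hard", "easy", "simple"}
--
-- _VALUE_KWS = {"worth", "price", "expensive", "cheap", "pay", "subscription",
--               "premium", "free", "cost", "money", "refund", "cancel"}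
--
-- _CRASH_KWS = {"crash", "bug", "freeze", "frozen", "error", "broken", "fix",
--               "update", "glitch", "loading", "load", "stuck"}
--
-- _POSITIVE_KWS = {"love", "great", "amazing", "excellent", "perfect", "best",
--                  "fantastic", "wonderful", "recommend", "brilliant"}
--
-- def _detect_theme_clusters(bigrams: list[dict]) -> list[str]:
--     """Map bigram phrases to plain-English insight sentences."""
--     all_words: set[str] = set()
--     for b in bigrams:
--         phrase = str(b.get("phrase", "")).lower()
--         all_words.update(phrase.replace("-", " ").split())
--     insights: list[str] = []
--     if all_words & _SUPPORT_KWS: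
--         insights.append(
--             "**Support response times** are a recurring theme — customers frequently mention waiting. "
--             "Cross-reference with your support ticket data around this window."
--         )
--     if all_words & _UI_KWS:
--         insights.append(
--             "**App navigation or usability** comes up — some users describe a learning curve before things clicked. "
--             "Consider whether onboarding copy or UI changes could reduce that friction."
--         )
--     if all_words & _VALUE_KWS:
--         insights.append(
--             "**Pricing or subscription value** is mentioned — worth checking whether recent price changes correlate with sentiment dips."
--         )
--     if all_words & _CRASH_KWS:
--         insights.append(
--             "**Stability or bug complaints** appear — cross-reference with your release notes and crash logs around these dates."
--         )
--     if not insights and all_words & _POSITIVE_KWS: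
--         insights.append(
--             "**Positive language dominates** this corpus — customers describe satisfaction rather than frustration."
--         )
--     return insights
-- ===== SOURCE B (Python) =====
-- _SUPPORT_KWS = {"support", "respond", "response", "took", "forever", "wait",
--                 "waiting", "slow", "hours", "days", "reply", "ticket", "contacted"}
--
-- _UI_KWS = {"clicked", "click", "finally", "figured", "intuitive", "confusing",
--            "confused", "navigation", "interface", "button", "screen", "menu",
--            "difficult", "hard", "easy", "simple"}
--
-- _VALUE_KWS = {"worth", "price", "expensive", "cheap", "pay", "subscription",
--               "premium", "free", "cost", "money", "refund", "cancel"}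
--
-- _CRASH_KWS = {"crash", "bug", "freeze", "frozen", "error", "broken", "fix",
--               "update", "glitch", "loading", "load", "stuck"}
--
-- _POSITIVE_KWS = {"love", "great", "amazing", "excellent", "perfect", "best",
--                  "fantastic", "wonderful", "recommend", "brilliant"}
--
-- _SUPPORT_TEXT = (
--     "**Support response times** are a recurring theme — customers frequently mention waiting. "
--     "Cross-reference with your support ticket data around this window."
-- )
-- _UI_TEXT = (
--     "**App navigation or usability** comes up — some users describe a learning curve before things clicked. "
--     "Consider whether onboarding copy or UI changes could reduce that friction."
-- )
-- _VALUE_TEXT = (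
--     "**Pricing or subscription value** is mentioned — worth checking whether recent price changes correlate with sentiment dips."
-- )
-- _CRASH_TEXT = (
--     "**Stability or bug complaints** appear — cross-reference with your release notes and crash logs around these dates."
-- )
-- _POSITIVE_TEXT = (
--     "**Positive language dominates** this corpus — customers describe satisfaction rather than frustration."
-- )
--
-- def _detect_theme_clusters(bigrams: list[dict]) -> list[str]:
--     """Single streaming pass over the words: flip one flag per theme, never
--     materialising the full word set or computing set intersections."""
--     support = ui = value = crash = positive = False
--     for b in bigrams:
--         phrase = str(b.get("phrase", "")).lower()
--         for w in phrase.replace("-", " ").split():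
--             if w in _SUPPORT_KWS:
--                 support = True
--             if w in _UI_KWS:
--                 ui = True
--             if w in _VALUE_KWS:
--                 value = True
--             if w in _CRASH_KWS:
--                 crash = True
--             if w in _POSITIVE_KWS:
--                 positive = True
--     insights: list[str] = []
--     if support:
--         insights.append(_SUPPORT_TEXT)
--     if ui:
--         insights.append(_UI_TEXT)
--     if value:
--         insights.append(_VALUE_TEXT)
--     if crash:
--         insights.append(_CRASH_TEXT)
--     if not insights and positive:
--         insights.append(_POSITIVE_TEXT)
--     return insights
-- ===== Notes on version B (the rewrite author's own statement) =====
-- stated objective: alternative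
-- what changed: B replaces A's two-phase scheme (materialise the set of all words, then take five set intersections) by a single streaming pass over the words that flips one boolean flag per theme and never builds the word set.
import Mathlib
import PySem

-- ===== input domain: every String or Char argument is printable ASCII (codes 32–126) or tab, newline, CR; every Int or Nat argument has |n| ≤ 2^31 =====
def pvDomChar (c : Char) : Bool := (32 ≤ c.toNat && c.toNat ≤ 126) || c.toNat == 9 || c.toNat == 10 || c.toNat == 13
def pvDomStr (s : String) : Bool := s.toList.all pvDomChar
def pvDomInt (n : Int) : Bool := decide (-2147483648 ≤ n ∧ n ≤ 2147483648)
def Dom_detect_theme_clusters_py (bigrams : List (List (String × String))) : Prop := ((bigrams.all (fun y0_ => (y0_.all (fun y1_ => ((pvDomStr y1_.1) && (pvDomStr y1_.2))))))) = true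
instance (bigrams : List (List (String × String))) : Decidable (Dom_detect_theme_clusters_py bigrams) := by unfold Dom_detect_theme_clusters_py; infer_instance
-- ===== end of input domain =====

-- B replaces A's build-the-word-set-then-intersect-five-times scheme by a single
-- streaming pass that flips one boolean flag per theme (objective: alternative).

-- shared module constants (the five keyword sets and the insight sentences)
def pvSupportKws : PySem.Set String := PySem.Set.ofList
  ["support", "respond", "response", "took", "forever", "wait",
   "waiting", "slow", "hours", "days", "reply", "ticket", "contacted"]
def pvUiKws : PySem.Set String := PySem.Set.ofList
  ["clicked", "click", "finally", "figured", "intuitive", "confusing",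
   "confused", "navigation", "interface", "button", "screen", "menu",
   "difficult", "hard", "easy", "simple"]
def pvValueKws : PySem.Set String := PySem.Set.ofList
  ["worth", "price", "expensive", "cheap", "pay", "subscription",
   "premium", "free", "cost", "money", "refund", "cancel"]
def pvCrashKws : PySem.Set String := PySem.Set.ofList
  ["crash", "bug", "freeze", "frozen", "error", "broken", "fix",
   "update", "glitch", "loading", "load", "stuck"]
def pvPositiveKws : PySem.Set String := PySem.Set.ofList
  ["love", "great", "amazing", "excellent", "perfect", "best",
   "fantastic", "wonderful", "recommend", "brilliant"]

def pvSupportText : String :=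
  "**Support response times** are a recurring theme — customers frequently mention waiting. Cross-reference with your support ticket data around this window."
def pvUiText : String :=
  "**App navigation or usability** comes up — some users describe a learning curve before things clicked. Consider whether onboarding copy or UI changes could reduce that friction."
def pvValueText : String :=
  "**Pricing or subscription value** is mentioned — worth checking whether recent price changes correlate with sentiment dips."
def pvCrashText : String :=
  "**Stability or bug complaints** appear — cross-reference with your release notes and crash logs around these dates."
def pvPositiveText : String :=
  "**Positive language dominates** this corpus — customers describe satisfaction rather than frustration."

-- phrase.replace("-", " ").split() of one bigram dict's lowered "phrase" value (shared line of both Pythons)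
def pvWordsOfBigram (b : List (String × String)) : List String :=
  PySem.Str.split₀ (PySem.Str.replace (PySem.Str.lower ((PySem.Dict.mk b).getD "phrase" "")) "-" " ")

-- ===== PORT A =====
def detect_theme_clusters_py (bigrams : List (List (String × String))) : List String :=
  -- all_words accumulated with set.update over each phrase's words
  let allWords : PySem.Set String :=
    bigrams.foldl (fun s b => PySem.Set.update s (pvWordsOfBigram b)) PySem.Set.empty
  let insights : List String := []
  let insights := if (PySem.Set.inter allWords pvSupportKws).isEmpty then insights else insights ++ [pvSupportText]
  let insights := if (PySem.Set.inter allWords pvUiKws).isEmpty then insights else insights ++ [pvUiText]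
  let insights := if (PySem.Set.inter allWords pvValueKws).isEmpty then insights else insights ++ [pvValueText]
  let insights := if (PySem.Set.inter allWords pvCrashKws).isEmpty then insights else insights ++ [pvCrashText]
  let insights := if insights.isEmpty && !(PySem.Set.inter allWords pvPositiveKws).isEmpty then insights ++ [pvPositiveText] else insights
  insights

-- ===== PORT B =====
-- the five flag variables of B's loop, as one record of loop state
structure pvFlags where
  support : Bool
  ui : Bool
  value : Bool
  crash : Bool
  positive : Bool
deriving DecidableEq, Repr

-- body of B's inner loop: one word flips the matching flags
def pvStepWord (f : pvFlags) (w : String) : pvFlags :=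
  let f := if PySem.Set.contains pvSupportKws w then { f with support := true } else f
  let f := if PySem.Set.contains pvUiKws w then { f with ui := true } else f
  let f := if PySem.Set.contains pvValueKws w then { f with value := true } else f
  let f := if PySem.Set.contains pvCrashKws w then { f with crash := true } else f
  let f := if PySem.Set.contains pvPositiveKws w then { f with positive := true } else f
  f

def detect_theme_clusters_py_alt (bigrams : List (List (String × String))) : List String :=
  let flags : pvFlags :=
    bigrams.foldl (fun f b => (pvWordsOfBigram b).foldl pvStepWord f)
      ⟨false, false, false, false, false⟩
  let insights : List String := []
  let insights := if flags.support then insights ++ [pvSupportText] else insights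
  let insights := if flags.ui then insights ++ [pvUiText] else insights
  let insights := if flags.value then insights ++ [pvValueText] else insights
  let insights := if flags.crash then insights ++ [pvCrashText] else insights
  let insights := if insights.isEmpty && flags.positive then insights ++ [pvPositiveText] else insights
  insights

-- ===== PRECONDITION & SPEC =====
def Spec_detect_theme_clusters_py (bigrams : List (List (String × String))) (out : List String) : Prop := out = detect_theme_clusters_py_alt bigrams
instance (bigrams : List (List (String × String))) (out : List String) : Decidable (Spec_detect_theme_clusters_py bigrams out) := by unfold Spec_detect_theme_clusters_py; infer_instance

-- ===== CLAIM (what is proved, stated in full; the proofs are below) =====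
def Claim_equal_detect_theme_clusters_py : Prop := ∀ (bigrams : List (List (String × String))), Dom_detect_theme_clusters_py bigrams → Spec_detect_theme_clusters_py bigrams (detect_theme_clusters_py bigrams)

-- ===== LEMMAS AND PROOFS =====

-- the whole word stream of the input
def pvWords (bigrams : List (List (String × String))) : List String :=
  bigrams.flatMap pvWordsOfBigram

-- A's all_words set has exactly the streamed words as members
theorem pv_mem_allWords (bigrams : List (List (String × String))) (s : PySem.Set String) (x : String) :
    x ∈ bigrams.foldl (fun s b => PySem.Set.update s (pvWordsOfBigram b)) s ↔
      x ∈ s ∨ x ∈ pvWords bigrams := by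
  induction bigrams generalizing s with
  | nil => simp [pvWords]
  | cons b bs ih =>
    simp [List.foldl_cons, ih, pvWords, PySem.Set.mem_update, List.flatMap_cons, or_assoc]

-- one word's effect on each flag
theorem pv_stepWord_fields (f : pvFlags) (w : String) :
    ((pvStepWord f w).support = (f.support || PySem.Set.contains pvSupportKws w)) ∧
    ((pvStepWord f w).ui = (f.ui || PySem.Set.contains pvUiKws w)) ∧
    ((pvStepWord f w).value = (f.value || PySem.Set.contains pvValueKws w)) ∧
    ((pvStepWord f w).crash = (f.crash || PySem.Set.contains pvCrashKws w)) ∧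
    ((pvStepWord f w).positive = (f.positive || PySem.Set.contains pvPositiveKws w)) := by
  simp only [pvStepWord]
  split_ifs <;> simp_all

-- each flag after B's inner word loop
theorem pv_foldWords (ws : List String) (f : pvFlags) :
    ((ws.foldl pvStepWord f).support = (f.support || ws.any (PySem.Set.contains pvSupportKws))) ∧
    ((ws.foldl pvStepWord f).ui = (f.ui || ws.any (PySem.Set.contains pvUiKws))) ∧
    ((ws.foldl pvStepWord f).value = (f.value || ws.any (PySem.Set.contains pvValueKws))) ∧
    ((ws.foldl pvStepWord f).crash = (f.crash || ws.any (PySem.Set.contains pvCrashKws))) ∧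
    ((ws.foldl pvStepWord f).positive = (f.positive || ws.any (PySem.Set.contains pvPositiveKws))) := by
  induction ws generalizing f with
  | nil => simp
  | cons w ws ih =>
    obtain ⟨h1, h2, h3, h4, h5⟩ := ih (pvStepWord f w)
    obtain ⟨s1, s2, s3, s4, s5⟩ := pv_stepWord_fields f w
    refine ⟨?_, ?_, ?_, ?_, ?_⟩ <;>
      simp [List.foldl_cons, List.any_cons, h1, h2, h3, h4, h5, s1, s2, s3, s4, s5, Bool.or_assoc]

-- each flag after B's whole loop
theorem pv_foldFlags (bigrams : List (List (String × String))) (f : pvFlags) :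
    ((bigrams.foldl (fun f b => (pvWordsOfBigram b).foldl pvStepWord f) f).support
        = (f.support || (pvWords bigrams).any (PySem.Set.contains pvSupportKws))) ∧
    ((bigrams.foldl (fun f b => (pvWordsOfBigram b).foldl pvStepWord f) f).ui
        = (f.ui || (pvWords bigrams).any (PySem.Set.contains pvUiKws))) ∧
    ((bigrams.foldl (fun f b => (pvWordsOfBigram b).foldl pvStepWord f) f).value
        = (f.value || (pvWords bigrams).any (PySem.Set.contains pvValueKws))) ∧
    ((bigrams.foldl (fun f b => (pvWordsOfBigram b).foldl pvStepWord f) f).crash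
        = (f.crash || (pvWords bigrams).any (PySem.Set.contains pvCrashKws))) ∧
    ((bigrams.foldl (fun f b => (pvWordsOfBigram b).foldl pvStepWord f) f).positive
        = (f.positive || (pvWords bigrams).any (PySem.Set.contains pvPositiveKws))) := by
  induction bigrams generalizing f with
  | nil => simp [pvWords]
  | cons b bs ih =>
    obtain ⟨h1, h2, h3, h4, h5⟩ := ih ((pvWordsOfBigram b).foldl pvStepWord f)
    obtain ⟨g1, g2, g3, g4, g5⟩ := pv_foldWords (pvWordsOfBigram b) f
    refine ⟨?_, ?_, ?_, ?_, ?_⟩ <;>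
      simp [pvWords, List.flatMap_cons, List.any_append, h1, h2, h3, h4, h5,
            g1, g2, g3, g4, g5, Bool.or_assoc]

-- A's emptiness test of an intersection equals the negated any-test on the word stream
theorem pv_inter_isEmpty (bigrams : List (List (String × String))) (k : PySem.Set String) :
    (PySem.Set.inter
        (bigrams.foldl (fun s b => PySem.Set.update s (pvWordsOfBigram b)) PySem.Set.empty) k).isEmpty
      = !((pvWords bigrams).any (PySem.Set.contains k)) := by
  rcases h : (pvWords bigrams).any (PySem.Set.contains k) with _ | _
  · simp only [Bool.not_false, List.isEmpty_iff, List.eq_nil_iff_forall_not_mem]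
    intro x hx
    rw [PySem.Set.mem_inter] at hx
    obtain ⟨hx1, hx2⟩ := hx
    rw [pv_mem_allWords] at hx1
    rcases hx1 with h' | h'
    · simp [PySem.Set.empty] at h'
    · rw [List.any_eq_false] at h
      exact absurd ((PySem.Set.contains_iff k x).mpr hx2) (by simpa using h x h')
  · rw [List.any_eq_true] at h
    obtain ⟨w, hw, hwk⟩ := h
    rw [Bool.not_true, List.isEmpty_eq_false_iff]
    have : w ∈ PySem.Set.inter
        (bigrams.foldl (fun s b => PySem.Set.update s (pvWordsOfBigram b)) PySem.Set.empty) k := by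
      rw [PySem.Set.mem_inter]
      exact ⟨(pv_mem_allWords bigrams _ w).mpr (Or.inr hw), (PySem.Set.contains_iff k w).mp hwk⟩
    intro hnil
    rw [hnil] at this
    exact absurd this (by simp)

-- ===== VERDICT (by name: the statement is the Claim_ definition above) =====
theorem detect_theme_clusters_py_spec : Claim_equal_detect_theme_clusters_py := by
  intro bigrams _
  unfold Spec_detect_theme_clusters_py detect_theme_clusters_py detect_theme_clusters_py_alt
  obtain ⟨h1, h2, h3, h4, h5⟩ :=
    pv_foldFlags bigrams ⟨false, false, false, false, false⟩
  simp only [h1, h2, h3, h4, h5, Bool.false_or,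
    pv_inter_isEmpty bigrams pvSupportKws, pv_inter_isEmpty bigrams pvUiKws,
    pv_inter_isEmpty bigrams pvValueKws, pv_inter_isEmpty bigrams pvCrashKws,
    pv_inter_isEmpty bigrams pvPositiveKws]
  rcases (pvWords bigrams).any (PySem.Set.contains pvSupportKws) <;>
  rcases (pvWords bigrams).any (PySem.Set.contains pvUiKws) <;>
  rcases (pvWords bigrams).any (PySem.Set.contains pvValueKws) <;>
  rcases (pvWords bigrams).any (PySem.Set.contains pvCrashKws) <;>
  rcases (pvWords bigrams).any (PySem.Set.contains pvPositiveKws) <;> simp
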